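-- pv_equiv track=rewrite | github.com/mtourne/ament_tools | ament_tools/commands/build_pkg/build_types/ament_cmake.py | extract_cmake_and_make_arguments
-- ===== SOURCE A (Python) =====
-- def extract_cmake_and_make_arguments(args):
--     cmake_args = []
--     make_args = []
--
--     arg_types = {
--         '--cmake-args': cmake_args,
--         '--make-args': make_args
--     }
--
--     arg_indexes = {}
--     for k in arg_types.keys():
--         if k in args:
--             arg_indexes[args.index(k)] = k
--
--     for index in reversed(sorted(arg_indexes.keys())):
--         arg_type = arg_indexes[index]
--         args, specific_args = split_arguments(args, arg_type)
--         arg_types[arg_type].extend(specific_args)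
--
--     return args, cmake_args, make_args
--
-- def split_arguments(args, splitter_name, default=None):
--     if splitter_name not in args:
--         return args, default
--     index = args.index(splitter_name)
--     return args[0:index], args[index + 1:]
-- ===== SOURCE B (Python) =====
-- def extract_cmake_and_make_arguments(args):
--     leftover = []
--     cmake_args = []
--     make_args = []
--     groups = {
--         '--cmake-args': cmake_args,
--         '--make-args': make_args,
--     }
--     current = leftover
--     seen = set()
--     for tok in args:
--         if tok in groups and tok not in seen:
--             seen.add(tok)
--             current = groups[tok]
--         else:
--             current.append(tok)
--     return leftover, cmake_args, make_args
-- ===== Notes on version B (the rewrite author's own statement) =====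
-- stated objective: simpler
-- what changed: Replaced the index-collect / sort / repeated split-and-slice passes (each using 'in' and .index scans) by a single forward pass with a current-group pointer and a seen set.
import Mathlib
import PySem

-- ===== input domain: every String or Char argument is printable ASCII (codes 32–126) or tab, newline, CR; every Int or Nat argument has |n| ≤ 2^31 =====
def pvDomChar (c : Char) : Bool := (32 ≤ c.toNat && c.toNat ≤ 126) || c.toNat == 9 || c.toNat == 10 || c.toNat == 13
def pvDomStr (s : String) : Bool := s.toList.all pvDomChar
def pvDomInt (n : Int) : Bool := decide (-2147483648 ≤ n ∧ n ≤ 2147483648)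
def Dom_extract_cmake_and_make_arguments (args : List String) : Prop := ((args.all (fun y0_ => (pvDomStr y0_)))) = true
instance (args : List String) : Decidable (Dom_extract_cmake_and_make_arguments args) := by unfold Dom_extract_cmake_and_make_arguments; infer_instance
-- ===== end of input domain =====

-- B replaces A's collect-indexes / sort / repeated split-and-slice passes by one forward pass
-- with a current-group pointer and a seen set (objective: simpler; same return value).

-- ===== PORT A =====
def split_arguments (args : List String) (splitter_name : String) :
    List String × Option (List String) :=
  if splitter_name ∉ args then (args, none)
  else
    match PySem.List.index? args splitter_name with
    | some index =>
        (PySem.List.slice args (some 0) (some (index : Int)),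
         some (PySem.List.slice args (some ((index : Int) + 1)) none))
    | none => (args, none)   -- unreachable: splitter_name ∈ args

def extract_cmake_and_make_arguments (args : List String) :
    List String × List String × List String :=
  -- cmake_args / make_args are the two (initially empty) lists held by arg_types;
  -- they travel as the second/third components of the fold state.
  let arg_indexes : PySem.Dict Nat String :=
    ["--cmake-args", "--make-args"].foldl
      (fun d k =>
        if k ∈ args then
          match PySem.List.index? args k with
          | some i => d.insert i k
          | none => d
        else d)
      PySem.Dict.empty
  let st :=
    (PySem.List.sorted arg_indexes.keys (fun x => x) false).reverse.foldl
      (fun (st : List String × List String × List String) index =>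
        match arg_indexes.get? index with
        | some arg_type =>
            let res := split_arguments st.1 arg_type
            let specific_args := res.2.getD []
            if arg_type == "--cmake-args" then
              (res.1, st.2.1 ++ specific_args, st.2.2)
            else
              (res.1, st.2.1, st.2.2 ++ specific_args)
        | none => st)
      (args, [], [])
  st

-- ===== PORT B =====
-- state: (leftover, cmake_args, make_args, current, seen); current 0/1/2 = which list
-- the Python variable `current` points at (leftover / cmake_args / make_args)
def pvAltStep (st : List String × List String × List String × Nat × PySem.Set String)
    (tok : String) : List String × List String × List String × Nat × PySem.Set String :=
  let (leftover, cmake_args, make_args, current, seen) := st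
  if (tok == "--cmake-args" || tok == "--make-args") && !(PySem.Set.contains seen tok) then
    (leftover, cmake_args, make_args,
      (if tok == "--cmake-args" then 1 else 2), PySem.Set.add seen tok)
  else
    match current with
    | 0 => (leftover ++ [tok], cmake_args, make_args, current, seen)
    | 1 => (leftover, cmake_args ++ [tok], make_args, current, seen)
    | _ => (leftover, cmake_args, make_args ++ [tok], current, seen)

def extract_cmake_and_make_arguments_alt (args : List String) :
    List String × List String × List String :=
  let st := args.foldl pvAltStep ([], [], [], 0, PySem.Set.empty)
  (st.1, st.2.1, st.2.2.1)

-- ===== PRECONDITION & SPEC =====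
def Spec_extract_cmake_and_make_arguments (args : List String) (out : List String × List String × List String) : Prop := out = extract_cmake_and_make_arguments_alt args
instance (args : List String) (out : List String × List String × List String) : Decidable (Spec_extract_cmake_and_make_arguments args out) := by unfold Spec_extract_cmake_and_make_arguments; infer_instance

-- ===== CLAIM (what is proved, stated in full; the proofs are below) =====
def Claim_equal_extract_cmake_and_make_arguments : Prop := ∀ (args : List String), Dom_extract_cmake_and_make_arguments args → Spec_extract_cmake_and_make_arguments args (extract_cmake_and_make_arguments args)

-- ===== LEMMAS AND PROOFS =====

-- first occurrence decomposition of a member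
theorem pv_first_occ {v : String} {l : List String} (h : v ∈ l) :
    ∃ p t, l = p ++ v :: t ∧ v ∉ p := by
  obtain ⟨k, hk⟩ := Option.isSome_iff_exists.1 ((PySem.List.index?_isSome_iff l v).2 h)
  obtain ⟨p, t, rfl, _, hvp⟩ := (PySem.List.index?_eq_some_iff l v k).1 hk
  exact ⟨p, t, rfl, hvp⟩

-- first splitter decomposition
theorem pv_first_split (args : List String) :
    ("--cmake-args" ∉ args ∧ "--make-args" ∉ args) ∨
    ∃ p s r, args = p ++ s :: r ∧ (s = "--cmake-args" ∨ s = "--make-args") ∧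
      "--cmake-args" ∉ p ∧ "--make-args" ∉ p := by
  induction args with
  | nil => exact Or.inl ⟨by simp, by simp⟩
  | cons x xs ih =>
    by_cases hx : x = "--cmake-args" ∨ x = "--make-args"
    · exact Or.inr ⟨[], x, xs, by simp, hx, by simp, by simp⟩
    · push_neg at hx
      rcases ih with ⟨h1, h2⟩ | ⟨p, s, r, rfl, hs, hp1, hp2⟩
      · refine Or.inl ⟨?_, ?_⟩ <;> simp [List.mem_cons, h1, h2] <;>
          exact fun h => (by simp_all : False)
      · refine Or.inr ⟨x :: p, s, r, by simp, hs, ?_, ?_⟩ <;>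
          simp [List.mem_cons, hp1, hp2] <;> exact fun h => (by simp_all : False)

theorem pv_take_len (p t : List String) (s : String) :
    (p ++ s :: t).take p.length = p := by
  simpa using List.take_left p (s :: t)

theorem pv_drop_len_succ (p t : List String) (s : String) :
    (p ++ s :: t).drop (p.length + 1) = t := by
  have h : p ++ s :: t = (p ++ [s]) ++ t := by simp
  rw [h, List.drop_left' (by simp)]

theorem pv_split_at_first (p t : List String) (s : String) (hs : s ∉ p) :
    split_arguments (p ++ s :: t) s = (p, some t) := by
  have hmem : s ∈ p ++ s :: t := by simp
  have hidx : PySem.List.index? (p ++ s :: t) s = some p.length :=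
    (PySem.List.index?_eq_some_iff _ _ _).2 ⟨p, t, rfl, rfl, hs⟩
  unfold split_arguments
  rw [if_neg (by simpa using hmem), hidx]
  dsimp only
  rw [PySem.List.slice_zero_start, PySem.List.slice_to_natCast]
  have h1 : ((p.length : Int) + 1) = ((p.length + 1 : Nat) : Int) := by push_cast; ring
  rw [h1, PySem.List.slice_from_natCast]
  rw [pv_take_len, pv_drop_len_succ]

-- ===== A-side case computations =====

theorem pv_A_none (args : List String) (hc : "--cmake-args" ∉ args) (hm : "--make-args" ∉ args) :
    extract_cmake_and_make_arguments args = (args, [], []) := by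
  simp [extract_cmake_and_make_arguments, hc, hm, PySem.Dict.empty, PySem.Dict.keys,
    PySem.List.sorted]

theorem pv_A_conly (p r : List String) (hpc : "--cmake-args" ∉ p) (hpm : "--make-args" ∉ p)
    (hr : "--make-args" ∉ r) :
    extract_cmake_and_make_arguments (p ++ "--cmake-args" :: r) = (p, r, []) := by
  have hidx : List.idxOf? "--cmake-args" (p ++ "--cmake-args" :: r) = some p.length := by
    have := (PySem.List.index?_eq_some_iff (p ++ "--cmake-args" :: r) "--cmake-args" p.length).2
      ⟨p, r, rfl, rfl, hpc⟩
    simpa [PySem.List.index?_eq_idxOf?] using this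
  simp [extract_cmake_and_make_arguments, hpm, hr, hidx,
    PySem.Dict.insert, PySem.Dict.empty, PySem.Dict.keys, PySem.Dict.get?,
    PySem.List.sorted, PySem.List.insertBy, pv_split_at_first p r _ hpc]

theorem pv_A_monly (p r : List String) (hpc : "--cmake-args" ∉ p) (hpm : "--make-args" ∉ p)
    (hr : "--cmake-args" ∉ r) :
    extract_cmake_and_make_arguments (p ++ "--make-args" :: r) = (p, [], r) := by
  have hidx : List.idxOf? "--make-args" (p ++ "--make-args" :: r) = some p.length := by
    have := (PySem.List.index?_eq_some_iff (p ++ "--make-args" :: r) "--make-args" p.length).2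
      ⟨p, r, rfl, rfl, hpm⟩
    simpa [PySem.List.index?_eq_idxOf?] using this
  simp [extract_cmake_and_make_arguments, hpc, hr, hidx,
    PySem.Dict.insert, PySem.Dict.empty, PySem.Dict.keys, PySem.Dict.get?,
    PySem.List.sorted, PySem.List.insertBy, pv_split_at_first p r _ hpm]

theorem pv_A_cm (p q t : List String) (hpc : "--cmake-args" ∉ p) (hpm : "--make-args" ∉ p)
    (hqm : "--make-args" ∉ q) :
    extract_cmake_and_make_arguments (p ++ "--cmake-args" :: (q ++ "--make-args" :: t))
      = (p, q, t) := by
  have hidxc : List.idxOf? "--cmake-args" (p ++ "--cmake-args" :: (q ++ "--make-args" :: t))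
      = some p.length := by
    have := (PySem.List.index?_eq_some_iff (p ++ "--cmake-args" :: (q ++ "--make-args" :: t))
      "--cmake-args" p.length).2 ⟨p, _, rfl, rfl, hpc⟩
    simpa [PySem.List.index?_eq_idxOf?] using this
  have hre : p ++ "--cmake-args" :: (q ++ "--make-args" :: t)
      = (p ++ "--cmake-args" :: q) ++ "--make-args" :: t := by simp
  have hidxm : List.idxOf? "--make-args" (p ++ "--cmake-args" :: (q ++ "--make-args" :: t))
      = some (p.length + (q.length + 1)) := by
    have := (PySem.List.index?_eq_some_iff ((p ++ "--cmake-args" :: q) ++ "--make-args" :: t)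
      "--make-args" (p ++ "--cmake-args" :: q).length).2 ⟨_, t, rfl, rfl, by simp [hpm, hqm]⟩
    rw [hre]
    simpa [PySem.List.index?_eq_idxOf?, Nat.add_comm, Nat.add_left_comm, Nat.add_assoc] using this
  have hlt : p.length < p.length + (q.length + 1) := by omega
  have hsplitm : split_arguments (p ++ "--cmake-args" :: (q ++ "--make-args" :: t))
      "--make-args" = (p ++ "--cmake-args" :: q, some t) := by
    rw [hre]; exact pv_split_at_first _ t _ (by simp [hpm, hqm])
  simp [extract_cmake_and_make_arguments, hidxc, hidxm,
    PySem.Dict.insert, PySem.Dict.empty, PySem.Dict.keys, PySem.Dict.get?,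
    PySem.List.sorted, PySem.List.insertBy, Nat.not_lt.2 (le_of_lt hlt),
    hsplitm, pv_split_at_first p q _ hpc]

theorem pv_A_mc (p q t : List String) (hpc : "--cmake-args" ∉ p) (hpm : "--make-args" ∉ p)
    (hqc : "--cmake-args" ∉ q) :
    extract_cmake_and_make_arguments (p ++ "--make-args" :: (q ++ "--cmake-args" :: t))
      = (p, t, q) := by
  have hre : p ++ "--make-args" :: (q ++ "--cmake-args" :: t)
      = (p ++ "--make-args" :: q) ++ "--cmake-args" :: t := by simp
  have hidxc : List.idxOf? "--cmake-args" (p ++ "--make-args" :: (q ++ "--cmake-args" :: t))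
      = some (p.length + (q.length + 1)) := by
    have := (PySem.List.index?_eq_some_iff ((p ++ "--make-args" :: q) ++ "--cmake-args" :: t)
      "--cmake-args" (p ++ "--make-args" :: q).length).2 ⟨_, t, rfl, rfl, by simp [hpc, hqc]⟩
    rw [hre]
    simpa [PySem.List.index?_eq_idxOf?, Nat.add_comm, Nat.add_left_comm, Nat.add_assoc] using this
  have hidxm : List.idxOf? "--make-args" (p ++ "--make-args" :: (q ++ "--cmake-args" :: t))
      = some p.length := by
    have := (PySem.List.index?_eq_some_iff (p ++ "--make-args" :: (q ++ "--cmake-args" :: t))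
      "--make-args" p.length).2 ⟨p, _, rfl, rfl, hpm⟩
    simpa [PySem.List.index?_eq_idxOf?] using this
  have hlt : p.length < p.length + (q.length + 1) := by omega
  have hsplitc : split_arguments (p ++ "--make-args" :: (q ++ "--cmake-args" :: t))
      "--cmake-args" = (p ++ "--make-args" :: q, some t) := by
    rw [hre]; exact pv_split_at_first _ t _ (by simp [hpc, hqc])
  simp [extract_cmake_and_make_arguments, hidxc, hidxm,
    PySem.Dict.insert, PySem.Dict.empty, PySem.Dict.keys, PySem.Dict.get?,
    PySem.List.sorted, PySem.List.insertBy, hlt,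
    hsplitc, pv_split_at_first p q _ hpm]

-- ===== B-side fold-run lemmas =====

theorem pv_run0 (p : List String) (l cm mk : List String) (seen : PySem.Set String)
    (hc : "--cmake-args" ∉ p) (hm : "--make-args" ∉ p) :
    p.foldl pvAltStep (l, cm, mk, 0, seen) = (l ++ p, cm, mk, 0, seen) := by
  induction p generalizing l with
  | nil => simp
  | cons x xs ih =>
    simp only [List.mem_cons, not_or] at hc hm
    have hstep : (x :: xs).foldl pvAltStep (l, cm, mk, 0, seen)
        = xs.foldl pvAltStep (l ++ [x], cm, mk, 0, seen) := by
      simp [pvAltStep, Ne.symm hc.1, Ne.symm hm.1]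
    rw [hstep, ih (l ++ [x]) (by simpa using hc.2) (by simpa using hm.2)]
    simp

theorem pv_run1 (p : List String) (l cm mk : List String) (seen : PySem.Set String)
    (h : ∀ x ∈ p, (x = "--cmake-args" ∨ x = "--make-args") → x ∈ seen) :
    p.foldl pvAltStep (l, cm, mk, 1, seen) = (l, cm ++ p, mk, 1, seen) := by
  induction p generalizing cm with
  | nil => simp
  | cons x xs ih =>
    have hstep : (x :: xs).foldl pvAltStep (l, cm, mk, 1, seen)
        = xs.foldl pvAltStep (l, cm ++ [x], mk, 1, seen) := by
      by_cases hx : x = "--cmake-args" ∨ x = "--make-args"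
      · simp [pvAltStep, PySem.Set.contains, h x (by simp) hx]
      · push_neg at hx
        simp [pvAltStep, hx.1, hx.2]
    rw [hstep, ih (cm ++ [x]) (fun y hy hy' => h y (by simp [hy]) hy')]
    simp

theorem pv_run2 (p : List String) (l cm mk : List String) (seen : PySem.Set String)
    (h : ∀ x ∈ p, (x = "--cmake-args" ∨ x = "--make-args") → x ∈ seen) :
    p.foldl pvAltStep (l, cm, mk, 2, seen) = (l, cm, mk ++ p, 2, seen) := by
  induction p generalizing mk with
  | nil => simp
  | cons x xs ih =>
    have hstep : (x :: xs).foldl pvAltStep (l, cm, mk, 2, seen)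
        = xs.foldl pvAltStep (l, cm, mk ++ [x], 2, seen) := by
      by_cases hx : x = "--cmake-args" ∨ x = "--make-args"
      · simp [pvAltStep, PySem.Set.contains, h x (by simp) hx]
      · push_neg at hx
        simp [pvAltStep, hx.1, hx.2]
    rw [hstep, ih (mk ++ [x]) (fun y hy hy' => h y (by simp [hy]) hy')]
    simp

-- ===== B-side case computations =====

theorem pv_B_none (args : List String) (hc : "--cmake-args" ∉ args)
    (hm : "--make-args" ∉ args) :
    extract_cmake_and_make_arguments_alt args = (args, [], []) := by
  simp only [extract_cmake_and_make_arguments_alt]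
  rw [pv_run0 args [] [] [] PySem.Set.empty hc hm]
  simp

theorem pv_B_conly (p r : List String) (hpc : "--cmake-args" ∉ p) (hpm : "--make-args" ∉ p)
    (hr : "--make-args" ∉ r) :
    extract_cmake_and_make_arguments_alt (p ++ "--cmake-args" :: r) = (p, r, []) := by
  simp only [extract_cmake_and_make_arguments_alt, List.foldl_append, List.foldl_cons]
  rw [pv_run0 p [] [] [] PySem.Set.empty hpc hpm]
  have hstep : pvAltStep (([] : List String) ++ p, [], [], 0, PySem.Set.empty) "--cmake-args"
      = (p, [], [], 1, ["--cmake-args"]) := by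
    simp [pvAltStep, PySem.Set.contains, PySem.Set.add, PySem.Set.empty]
  rw [hstep, pv_run1 r p [] [] _ (by
    rintro x hx (rfl | rfl)
    · simp
    · exact absurd hx hr)]
  simp

theorem pv_B_monly (p r : List String) (hpc : "--cmake-args" ∉ p) (hpm : "--make-args" ∉ p)
    (hr : "--cmake-args" ∉ r) :
    extract_cmake_and_make_arguments_alt (p ++ "--make-args" :: r) = (p, [], r) := by
  simp only [extract_cmake_and_make_arguments_alt, List.foldl_append, List.foldl_cons]
  rw [pv_run0 p [] [] [] PySem.Set.empty hpc hpm]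
  have hstep : pvAltStep (([] : List String) ++ p, [], [], 0, PySem.Set.empty) "--make-args"
      = (p, [], [], 2, ["--make-args"]) := by
    simp [pvAltStep, PySem.Set.contains, PySem.Set.add, PySem.Set.empty]
  rw [hstep, pv_run2 r p [] [] _ (by
    rintro x hx (rfl | rfl)
    · exact absurd hx hr
    · simp)]
  simp

theorem pv_B_cm (p q t : List String) (hpc : "--cmake-args" ∉ p) (hpm : "--make-args" ∉ p)
    (hqm : "--make-args" ∉ q) :
    extract_cmake_and_make_arguments_alt (p ++ "--cmake-args" :: (q ++ "--make-args" :: t))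
      = (p, q, t) := by
  simp only [extract_cmake_and_make_arguments_alt, List.foldl_append, List.foldl_cons]
  rw [pv_run0 p [] [] [] PySem.Set.empty hpc hpm]
  have hstep1 : pvAltStep (([] : List String) ++ p, [], [], 0, PySem.Set.empty) "--cmake-args"
      = (p, [], [], 1, ["--cmake-args"]) := by
    simp [pvAltStep, PySem.Set.contains, PySem.Set.add, PySem.Set.empty]
  rw [hstep1, pv_run1 q p [] [] _ (by
    rintro x hx (rfl | rfl)
    · simp
    · exact absurd hx hqm)]
  have hstep2 : pvAltStep (p, ([] : List String) ++ q, [], 1, (["--cmake-args"] : PySem.Set String))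
      "--make-args" = (p, q, [], 2, ["--cmake-args", "--make-args"]) := by
    simp [pvAltStep, PySem.Set.contains, PySem.Set.add]
  rw [hstep2, pv_run2 t p q [] _ (by rintro x _ (rfl | rfl) <;> simp)]
  simp

theorem pv_B_mc (p q t : List String) (hpc : "--cmake-args" ∉ p) (hpm : "--make-args" ∉ p)
    (hqc : "--cmake-args" ∉ q) :
    extract_cmake_and_make_arguments_alt (p ++ "--make-args" :: (q ++ "--cmake-args" :: t))
      = (p, t, q) := by
  simp only [extract_cmake_and_make_arguments_alt, List.foldl_append, List.foldl_cons]
  rw [pv_run0 p [] [] [] PySem.Set.empty hpc hpm]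
  have hstep1 : pvAltStep (([] : List String) ++ p, [], [], 0, PySem.Set.empty) "--make-args"
      = (p, [], [], 2, ["--make-args"]) := by
    simp [pvAltStep, PySem.Set.contains, PySem.Set.add, PySem.Set.empty]
  rw [hstep1, pv_run2 q p [] [] _ (by
    rintro x hx (rfl | rfl)
    · exact absurd hx hqc
    · simp)]
  have hstep2 : pvAltStep (p, [], ([] : List String) ++ q, 2, (["--make-args"] : PySem.Set String))
      "--cmake-args" = (p, [], q, 1, ["--make-args", "--cmake-args"]) := by
    simp [pvAltStep, PySem.Set.contains, PySem.Set.add]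
  rw [hstep2, pv_run1 t p [] q _ (by rintro x _ (rfl | rfl) <;> simp)]
  simp

-- ===== VERDICT (by name: the statement is the Claim_ definition above) =====
theorem extract_cmake_and_make_arguments_spec : Claim_equal_extract_cmake_and_make_arguments := by
  intro args _
  unfold Spec_extract_cmake_and_make_arguments
  rcases pv_first_split args with ⟨hc, hm⟩ | ⟨p, s, r, rfl, hs, hpc, hpm⟩
  · rw [pv_A_none args hc hm, pv_B_none args hc hm]
  · rcases hs with rfl | rfl
    · by_cases hm : "--make-args" ∈ r
      · obtain ⟨q, t, rfl, hqm⟩ := pv_first_occ hm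
        rw [pv_A_cm p q t hpc hpm hqm, pv_B_cm p q t hpc hpm hqm]
      · rw [pv_A_conly p r hpc hpm hm, pv_B_conly p r hpc hpm hm]
    · by_cases hc : "--cmake-args" ∈ r
      · obtain ⟨q, t, rfl, hqc⟩ := pv_first_occ hc
        rw [pv_A_mc p q t hpc hpm hqc, pv_B_mc p q t hpc hpm hqc]
      · rw [pv_A_monly p r hpc hpm hc, pv_B_monly p r hpc hpm hc]
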